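-- pv_equiv track=rewrite | github.com/aeliseeva3/Practicum-10 | 10-9.py | calculate_days_since_new_year
-- ===== SOURCE A (Python) =====
-- def is_leap_year(year):
--     """
--     Checks if a year is a leap year.
--     :param year: Year to check
--     :return: True if the year is a leap year, False otherwise
--     """
--     return (year % 4 == 0 and year % 100 != 0) or (year % 400 == 0)
--
-- def calculate_days_since_new_year(month, day, year):
--     """
--     Calculates the number of days elapsed since the beginning of the year up to the specified date.
--     :param month: Month
--     :param day: Day
--     :param year: Year
--     :return: Number of days since the beginning of the year (0-364 or 0-365)
--     """
--     days_in_month = [31, 28, 31, 30, 31, 30, 31, 31, 30, 31, 30, 31]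
--
--     if is_leap_year(year):
--         days_in_month[1] = 29
--
--     days_passed = 0
--     for number in range(month - 1):
--         days_passed += days_in_month[number]
--
--     days_passed += day - 1
--
--     return days_passed
-- ===== SOURCE B (Python) =====
-- from itertools import accumulate
--
-- _DAYS = [31, 28, 31, 30, 31, 30, 31, 31, 30, 31, 30, 31]
-- _CUM = list(accumulate(_DAYS, initial=0))  # cumulative days before each month; len 13
--
--
-- def calculate_days_since_new_year(month, day, year):
--     leap = (year % 4 == 0 and year % 100 != 0) or (year % 400 == 0)
--     base = _CUM[max(month - 1, 0)]
--     if leap and month > 2: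
--         base += 1
--     return base + day - 1
-- ===== Notes on version B (the rewrite author's own statement) =====
-- stated objective: simpler
-- what changed: The per-call loop summing month lengths is replaced by a precomputed cumulative prefix table (itertools.accumulate) indexed once, with a +1 adjustment for leap years after February.
import Mathlib
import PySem

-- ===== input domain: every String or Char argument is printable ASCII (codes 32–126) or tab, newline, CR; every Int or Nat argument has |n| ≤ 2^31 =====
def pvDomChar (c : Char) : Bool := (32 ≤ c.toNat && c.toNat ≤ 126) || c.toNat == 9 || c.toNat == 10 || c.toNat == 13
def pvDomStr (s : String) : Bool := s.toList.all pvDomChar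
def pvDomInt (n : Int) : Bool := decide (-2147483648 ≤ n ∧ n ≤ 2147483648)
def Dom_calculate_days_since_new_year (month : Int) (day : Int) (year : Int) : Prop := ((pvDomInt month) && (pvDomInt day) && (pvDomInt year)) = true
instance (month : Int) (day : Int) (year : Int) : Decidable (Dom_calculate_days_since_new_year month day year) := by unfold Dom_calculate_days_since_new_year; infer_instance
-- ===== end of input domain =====

-- B replaces A's per-call month loop with a precomputed cumulative prefix table and one lookup (objective: simpler).

-- ===== PORT A =====
def is_leap_year (year : Int) : Bool :=
  (PySem.Int.mod year 4 == 0 && PySem.Int.mod year 100 != 0) || (PySem.Int.mod year 400 == 0)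

def calculate_days_since_new_year (month : Int) (day : Int) (year : Int) : Int :=
  let days_in_month : List Int := [31, 28, 31, 30, 31, 30, 31, 31, 30, 31, 30, 31]
  let days_in_month := if is_leap_year year then days_in_month.set 1 29 else days_in_month
  -- loop `for number in range(month - 1)` ; pyGet? is exact, .getD 0 is only reached outside Pre_
  let days_passed :=
    (PySem.List.pyRange 0 (month - 1) 1).foldl
      (fun acc number => acc + (PySem.List.pyGet? days_in_month number).getD 0) 0
  let days_passed := days_passed + (day - 1)
  days_passed

-- ===== PORT B =====
-- _CUM = list(accumulate(_DAYS, initial=0))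
def pvCum : List Int :=
  (([31, 28, 31, 30, 31, 30, 31, 31, 30, 31, 30, 31] : List Int).foldl
    (fun (p : List Int × Int) d => (p.1 ++ [p.2 + d], p.2 + d)) ([0], 0)).1

def calculate_days_since_new_year_alt (month : Int) (day : Int) (year : Int) : Int :=
  let leap := (PySem.Int.mod year 4 == 0 && PySem.Int.mod year 100 != 0) || (PySem.Int.mod year 400 == 0)
  let base := (PySem.List.pyGet? pvCum (max (month - 1) 0)).getD 0
  let base := if leap && month > 2 then base + 1 else base
  base + day - 1

-- ===== PRECONDITION & SPEC =====
-- A raises IndexError for month ≥ 14 (the loop indexes past the 12-entry list); B's table lookup raises there too.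
def Pre_calculate_days_since_new_year (month : Int) (day : Int) (year : Int) : Prop := month ≤ 13
instance (month : Int) (day : Int) (year : Int) : Decidable (Pre_calculate_days_since_new_year month day year) := by unfold Pre_calculate_days_since_new_year; infer_instance
def pvWitness_calculate_days_since_new_year : Int × Int × Int := (3, 15, 2024)

def Spec_calculate_days_since_new_year (month : Int) (day : Int) (year : Int) (out : Int) : Prop := out = calculate_days_since_new_year_alt month day year
instance (month : Int) (day : Int) (year : Int) (out : Int) : Decidable (Spec_calculate_days_since_new_year month day year out) := by unfold Spec_calculate_days_since_new_year; infer_instance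

-- ===== CLAIM (what is proved, stated in full; the proofs are below) =====
def Claim_equal_calculate_days_since_new_year : Prop := ∀ (month : Int) (day : Int) (year : Int), Dom_calculate_days_since_new_year month day year → Pre_calculate_days_since_new_year month day year → Spec_calculate_days_since_new_year month day year (calculate_days_since_new_year month day year)

-- ===== LEMMAS AND PROOFS =====

-- ===== VERDICT (by name: the statement is the Claim_ definition above) =====
theorem calculate_days_since_new_year_spec : Claim_equal_calculate_days_since_new_year := by
  intro month day year _ hpre
  unfold Spec_calculate_days_since_new_year
  unfold Pre_calculate_days_since_new_year at hpre
  by_cases hm : month ≤ 0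
  · have h0 : max (month - 1) 0 = 0 := by omega
    have hr : PySem.List.pyRange 0 (month - 1) 1 = [] :=
      PySem.List.pyRange_one_eq_nil (by omega)
    simp [calculate_days_since_new_year, calculate_days_since_new_year_alt, pvCum, hr, h0,
      PySem.List.pyGet?, PySem.List.pyIdx?]
    omega
  · have h1 : 1 ≤ month := by omega
    by_cases hleap : ((4:Int) ∣ year ∧ ¬((100:Int) ∣ year)) ∨ (400:Int) ∣ year
    · interval_cases month <;>
        simp [calculate_days_since_new_year, calculate_days_since_new_year_alt, is_leap_year,
          pvCum, hleap, PySem.List.pyRange, PySem.List.pyGet?, PySem.List.pyIdx?,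
          List.range_succ] <;> omega
    · interval_cases month <;>
        simp [calculate_days_since_new_year, calculate_days_since_new_year_alt, is_leap_year,
          pvCum, hleap, PySem.List.pyRange, PySem.List.pyGet?, PySem.List.pyIdx?,
          List.range_succ] <;> omega
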